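-- pv_equiv track=rewrite | github.com/Jackywathy/friendly-tribble-uni | Progcomp/rats.py | rev_sort
-- ===== SOURCE A (Python) =====
-- def revFunc(i):
--     return int("".join(reversed((str(i)))))
--
-- def rev_sort(i, check, count):
--     if i > 10**12:
--         return []
--
--     # i is int of number,
--     rev = revFunc(i)
--     # sorts and reerses string
--     sort = int("".join(sorted(str(i+rev))))
--
--     if sort in check:
--         return check[check.index(sort):]
--     else:
--         check.append(sort)
--         return rev_sort(sort, check, count+1)
-- ===== SOURCE B (Python) =====
-- def rev_sort(i, check, count):
--     # iterative driver with a value -> first-index map instead of `in` + `.index` scans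
--     pos = {}
--     for idx, v in enumerate(check):
--         if v not in pos:
--             pos[v] = idx
--     while i <= 10**12:
--         nxt = int("".join(sorted(str(i + int(str(i)[::-1])))))
--         j = pos.get(nxt)
--         if j is not None:
--             return check[j:]
--         pos[nxt] = len(check)
--         check.append(nxt)
--         i = nxt
--     return []
-- ===== Notes on version B (the rewrite author's own statement) =====
-- stated objective: alternative
-- what changed: A's recursive driver with per-step `sort in check` + `check.index(sort)` list scans is replaced by an iterative while-loop that maintains a value-to-first-index dict for the repeat test and slice start; same asymptotics in practice since the chains are short.
-- outside the precondition, e.g. on rev_sort(-5, [], 0): A raises ValueError, B raises ValueError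
import Mathlib
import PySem

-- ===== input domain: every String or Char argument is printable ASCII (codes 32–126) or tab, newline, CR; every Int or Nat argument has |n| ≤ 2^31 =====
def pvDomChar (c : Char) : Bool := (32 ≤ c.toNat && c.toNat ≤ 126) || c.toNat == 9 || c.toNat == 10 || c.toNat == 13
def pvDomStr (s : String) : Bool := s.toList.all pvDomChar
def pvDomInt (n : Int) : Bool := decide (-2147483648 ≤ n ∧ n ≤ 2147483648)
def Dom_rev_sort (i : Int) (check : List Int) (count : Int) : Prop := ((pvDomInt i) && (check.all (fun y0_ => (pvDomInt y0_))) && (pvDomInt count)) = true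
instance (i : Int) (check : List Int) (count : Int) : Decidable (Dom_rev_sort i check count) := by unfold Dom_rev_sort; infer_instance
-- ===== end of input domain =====

-- B replaces A's recursive driver with an iterative loop over a value→first-index map, removing
-- the `in`/`.index` scans of `check` (objective: alternative decomposition). Both A and B append
-- the same elements to the caller's `check` in the same order; the proof is about the return value.

-- ===== PORT A =====
-- fuel only makes the recursion structural: each recursive call appends a fresh value in
-- [0, 10^14) to `check`, so 10^14 + 2 steps can never be exhausted.
def rev_sort_go (fuel : Nat) (i : Int) (check : List Int) (count : Int) : List Int :=
  match fuel with
  | 0 => []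
  | fuel + 1 =>
    if i > 10 ^ 12 then []
    else
      let rev := (PySem.Int.ofChars? ((PySem.Int.toChars i).reverse)).getD 0
      let sort := (PySem.Int.ofChars?
        (PySem.List.sorted (PySem.Int.toChars (i + rev)) (fun c => c) false)).getD 0
      match PySem.List.index? check sort with
      | some idx => PySem.List.slice check (some (idx : Int)) none
      | none => rev_sort_go fuel sort (check ++ [sort]) (count + 1)

def rev_sort (i : Int) (check : List Int) (count : Int) : List Int :=
  rev_sort_go (10 ^ 14 + 2) i check count

-- ===== PORT B =====
def rev_sort_alt_go (fuel : Nat) (i : Int) (pos : PySem.Dict Int Int) (check : List Int) : List Int :=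
  match fuel with
  | 0 => []
  | fuel + 1 =>
    if i ≤ 10 ^ 12 then
      let nxt := (PySem.Int.ofStr? (String.ofList
        (PySem.List.sorted (PySem.Int.toStr
          (i + (PySem.Int.ofStr?
                  ((PySem.Str.slice? (PySem.Int.toStr i) none none (-1)).getD "")).getD 0)).toList
          (fun c => c) false))).getD 0
      match pos.get? nxt with
      | some j => PySem.List.slice check (some j) none
      | none => rev_sort_alt_go fuel nxt (pos.insert nxt (check.length : Int)) (check ++ [nxt])
    else []

def rev_sort_alt (i : Int) (check : List Int) (count : Int) : List Int :=
  let pos := (PySem.List.enumerate check).foldl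
    (fun pos p => if pos.contains p.2 then pos else pos.insert p.2 p.1) PySem.Dict.empty
  rev_sort_alt_go (10 ^ 14 + 2) i pos check

-- ===== PRECONDITION & SPEC =====
-- Pre_ excludes negative i, on which Python A raises ValueError: int() of the reversed string of
-- a negative number ("-21" -> "12-") is not a numeral.
def Pre_rev_sort (i : Int) (check : List Int) (count : Int) : Prop := 0 ≤ i
instance (i : Int) (check : List Int) (count : Int) : Decidable (Pre_rev_sort i check count) := by unfold Pre_rev_sort; infer_instance
def pvWitness_rev_sort : Int × List Int × Int := (3, [444, 888], 0)

def Spec_rev_sort (i : Int) (check : List Int) (count : Int) (out : List Int) : Prop := out = rev_sort_alt i check count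
instance (i : Int) (check : List Int) (count : Int) (out : List Int) : Decidable (Spec_rev_sort i check count out) := by unfold Spec_rev_sort; infer_instance

-- ===== CLAIM (what is proved, stated in full; the proofs are below) =====
def Claim_equal_rev_sort : Prop := ∀ (i : Int) (check : List Int) (count : Int), Dom_rev_sort i check count → Pre_rev_sort i check count → Spec_rev_sort i check count (rev_sort i check count)

-- ===== LEMMAS AND PROOFS =====

-- B's next-value expression equals A's (s[::-1] is reverse; ofStr?/toStr are ofChars?/toChars)
lemma nxt_eq (i : Int) :
    (PySem.Int.ofStr? (String.ofList
        (PySem.List.sorted (PySem.Int.toStr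
          (i + (PySem.Int.ofStr?
                  ((PySem.Str.slice? (PySem.Int.toStr i) none none (-1)).getD "")).getD 0)).toList
          (fun c => c) false))).getD 0
    = (PySem.Int.ofChars?
        (PySem.List.sorted (PySem.Int.toChars
          (i + (PySem.Int.ofChars? ((PySem.Int.toChars i).reverse)).getD 0)) (fun c => c) false)).getD 0 := by
  simp [PySem.Str.slice?_none_none_neg_one, PySem.Int.ofStr?, PySem.Int.toStr, String.toList_ofList]

-- loop equivalence: if pos maps each value to its first index in check, the two drivers agree
lemma go_eq (fuel : Nat) :
    ∀ (i : Int) (check : List Int) (count : Int) (pos : PySem.Dict Int Int),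
    (∀ v : Int, pos.get? v = (PySem.List.index? check v).map (fun n => (n : Int))) →
    rev_sort_go fuel i check count = rev_sort_alt_go fuel i pos check := by
  induction fuel with
  | zero => intro i check count pos _; rfl
  | succ fuel ih =>
    intro i check count pos hinv
    rw [rev_sort_go, rev_sort_alt_go]
    by_cases hb : i > 10 ^ 12
    · rw [if_pos hb, if_neg (by omega)]
    · rw [if_neg hb, if_pos (by omega)]
      simp only [nxt_eq]
      set sort := (PySem.Int.ofChars?
        (PySem.List.sorted (PySem.Int.toChars
          (i + (PySem.Int.ofChars? ((PySem.Int.toChars i).reverse)).getD 0)) (fun c => c) false)).getD 0 with hsort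
      rw [hinv sort]
      rcases hq : PySem.List.index? check sort with _ | idx
      · apply ih
        intro v
        by_cases hv : v = sort
        · subst hv
          rw [PySem.Dict.get?_insert_self,
            PySem.List.index?_append_singleton_self check sort ((PySem.List.index?_eq_none_iff check sort).mp hq)]
          rfl
        · rw [PySem.Dict.get?_insert_of_ne pos _ hv, hinv v]
          by_cases hm : v ∈ check
          · rw [PySem.List.index?_append_of_mem [sort] hm]
          · rw [(PySem.List.index?_eq_none_iff check v).mpr hm,
              (PySem.List.index?_eq_none_iff _ v).mpr (by simp [hm, hv])]
      · rfl

-- building pos from enumerate(check, s) yields first-occurrence indices offset by s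
lemma buildPos_aux (l : List Int) :
    ∀ (pos : PySem.Dict Int Int) (s : Int) (v : Int),
    ((PySem.List.enumerate l s).foldl
      (fun pos p => if pos.contains p.2 then pos else pos.insert p.2 p.1) pos).get? v
    = (pos.get? v).or ((PySem.List.index? l v).map (fun n => s + (n : Int))) := by
  induction l with
  | nil => intro pos s v; simp [PySem.List.enumerate_nil, PySem.List.index?]
  | cons x t ih =>
    intro pos s v
    rw [PySem.List.enumerate_cons]
    simp only [List.foldl_cons]
    rw [ih]
    by_cases hv : v = x
    · subst hv
      by_cases hc : pos.contains v
      · obtain ⟨w, hw⟩ := Option.isSome_iff_exists.mp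
          ((PySem.Dict.contains_eq_isSome_get? pos v) ▸ hc)
        simp [hc, hw]
      · have hs : pos.get? v = none := by
          have := (PySem.Dict.contains_eq_isSome_get? pos v) ▸ hc
          simpa using this
        rw [if_neg hc, PySem.Dict.get?_insert_self, PySem.List.index?_cons_self]
        simp [hs]
    · have hrec := PySem.List.index?_cons_of_ne (x := x) (v := v) t (Ne.symm hv)
      have hget : (if pos.contains x then pos else pos.insert x s).get? v = pos.get? v := by
        by_cases hc : pos.contains x
        · rw [if_pos hc]
        · rw [if_neg hc]
          exact PySem.Dict.get?_insert_of_ne pos s hv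
      rw [hget, hrec]
      rcases hs : pos.get? v with _ | w
      · rcases hq : PySem.List.index? t v with _ | n
        · simp
        · simp; omega
      · simp

-- ===== VERDICT (by name: the statement is the Claim_ definition above) =====
theorem rev_sort_spec : Claim_equal_rev_sort := by
  intro i check count _ _
  unfold Spec_rev_sort rev_sort rev_sort_alt
  apply go_eq
  intro v
  rw [buildPos_aux]
  simp [PySem.Dict.get?_empty]
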